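-- pv_equiv track=rewrite | github.com/Zeke-MA/AdventOfCode2024 | 2024/Day2/Day2.py | is_safe_decrease
-- ===== SOURCE A (Python) =====
-- def is_safe_decrease(report):
--     safe = True
--     fault = 0
--     for i in range(len(report) - 1):
--         diff = abs(report[i] - report[i + 1])
--         if diff > 0 and diff <= 3 and fault < 1:
--             if report[i] > report[i + 1]:
--                 safe = True
--             else:
--                 safe = True
--                 fault += 1
--         elif diff > 0 and diff <= 3 and fault >= 1:
--             if report[i] > report[i + 1]:
--                 safe = True
--             else:
--                 return False
--         else:
--             return False
--     return safe
-- ===== SOURCE B (Python) =====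
-- def is_safe_decrease(report):
--     diffs = [report[i + 1] - report[i] for i in range(len(report) - 1)]
--     if any(abs(d) < 1 or abs(d) > 3 for d in diffs):
--         return False
--     return sum(1 for d in diffs if d > 0) <= 1
-- ===== Notes on version B (the rewrite author's own statement) =====
-- stated objective: idiomatic
-- what changed: Replaces A's single early-terminating loop with safe/fault bookkeeping by building the signed difference table once, rejecting via an any() validity pass, and then counting increasing steps (at most one allowed).
import Mathlib
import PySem

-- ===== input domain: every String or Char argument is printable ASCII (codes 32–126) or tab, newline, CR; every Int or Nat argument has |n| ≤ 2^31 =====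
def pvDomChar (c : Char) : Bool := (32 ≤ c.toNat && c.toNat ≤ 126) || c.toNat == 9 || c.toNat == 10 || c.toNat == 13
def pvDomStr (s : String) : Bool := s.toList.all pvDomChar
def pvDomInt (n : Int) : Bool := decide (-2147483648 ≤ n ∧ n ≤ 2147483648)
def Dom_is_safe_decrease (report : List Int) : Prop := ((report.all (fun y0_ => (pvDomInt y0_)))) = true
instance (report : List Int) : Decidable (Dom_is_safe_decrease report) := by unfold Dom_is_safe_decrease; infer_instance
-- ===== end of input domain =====

-- B rephrases A's early-terminating loop with flag/fault state as a difference table plus two aggregate passes (validity check, then increase count); idiomatic, same cost.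


-- ===== PORT A =====
-- the loop of A over range(len(report)-1); indices produced by pyRange are always in
-- bounds, so pyGet? never returns none and `.getD 0` is exact here
def pvLoopA (report : List Int) : List Int → Bool → Int → Bool
  | [], safe, _ => safe
  | i :: rest, _, fault =>
    let a := (PySem.List.pyGet? report i).getD 0
    let b := (PySem.List.pyGet? report (i + 1)).getD 0
    let diff := |a - b|
    if diff > 0 ∧ diff ≤ 3 ∧ fault < 1 then
      if a > b then pvLoopA report rest true fault
      else pvLoopA report rest true (fault + 1)
    else if diff > 0 ∧ diff ≤ 3 ∧ fault ≥ 1 then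
      if a > b then pvLoopA report rest true fault
      else false
    else false

def is_safe_decrease (report : List Int) : Bool :=
  pvLoopA report (PySem.List.pyRange 0 ((report.length : Int) - 1) 1) true 0

-- ===== PORT B =====
def is_safe_decrease_alt (report : List Int) : Bool :=
  let diffs := (PySem.List.pyRange 0 ((report.length : Int) - 1) 1).map
    (fun i => (PySem.List.pyGet? report (i + 1)).getD 0 - (PySem.List.pyGet? report i).getD 0)
  if diffs.any (fun d => decide (|d| < 1 ∨ |d| > 3)) then false
  else decide ((diffs.filter (fun d => decide (d > 0))).length ≤ 1)

-- ===== PRECONDITION & SPEC =====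
def Spec_is_safe_decrease (report : List Int) (out : Bool) : Prop := out = is_safe_decrease_alt report
instance (report : List Int) (out : Bool) : Decidable (Spec_is_safe_decrease report out) := by unfold Spec_is_safe_decrease; infer_instance

-- ===== CLAIM (what is proved, stated in full; the proofs are below) =====
def Claim_equal_is_safe_decrease : Prop := ∀ (report : List Int), Dom_is_safe_decrease report → Spec_is_safe_decrease report (is_safe_decrease report)

-- ===== LEMMAS AND PROOFS =====
-- the signed difference at index i, as B computes it
def pvD (report : List Int) (i : Int) : Int :=
  (PySem.List.pyGet? report (i + 1)).getD 0 - (PySem.List.pyGet? report i).getD 0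

-- loop invariant: for nonnegative fault, A's loop over the remaining indices returns
-- true iff every remaining difference is valid and the remaining increases fit the cap
lemma pvLoopA_eq (report : List Int) (idxs : List Int) (fault : Int) (hf : 0 ≤ fault) :
    pvLoopA report idxs true fault =
      (((idxs.map (pvD report)).all (fun d => !decide (|d| < 1 ∨ |d| > 3))) &&
       decide (((idxs.map (pvD report)).filter (fun d => decide (d > 0))).length
                ≤ (if fault < 1 then 1 else 0))) := by
  induction idxs generalizing fault with
  | nil => simp [pvLoopA]
  | cons i rest ih =>
    have hD : pvD report i =
        (PySem.List.pyGet? report (i + 1)).getD 0 - (PySem.List.pyGet? report i).getD 0 := rfl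
    have habs : |(PySem.List.pyGet? report i).getD 0 - (PySem.List.pyGet? report (i + 1)).getD 0|
        = |pvD report i| := by rw [hD, abs_sub_comm]
    have hgt : ((PySem.List.pyGet? report i).getD 0 > (PySem.List.pyGet? report (i + 1)).getD 0)
        ↔ pvD report i < 0 := by rw [hD]; omega
    simp only [pvLoopA, habs, hgt, List.map_cons, List.all_cons]
    by_cases hv : |pvD report i| > 0 ∧ |pvD report i| ≤ 3
    · have hA : (!decide (|pvD report i| < 1 ∨ |pvD report i| > 3)) = true := by
        simp only [Bool.not_eq_true', decide_eq_false_iff_not]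
        omega
      have hne : pvD report i ≠ 0 := abs_pos.mp hv.1
      rw [hA, Bool.true_and]
      simp only [List.filter_cons]
      by_cases hs : pvD report i < 0
      · -- decreasing step: the filter drops this difference, fault is unchanged
        have hP : (decide (pvD report i > 0)) = false := by
          simp only [decide_eq_false_iff_not]
          omega
        rw [hP]
        simp only [Bool.false_eq_true, if_false]
        by_cases hf1 : fault < 1
        · rw [if_pos ⟨hv.1, hv.2, hf1⟩, if_pos hs, ih fault hf]
        · rw [if_neg (fun h => hf1 h.2.2), if_pos ⟨hv.1, hv.2, by omega⟩, if_pos hs, ih fault hf]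
      · -- increasing step: the filter keeps this difference
        have hDpos : 0 < pvD report i := by omega
        have hP : (decide (pvD report i > 0)) = true := decide_eq_true hDpos
        rw [hP, if_pos rfl]
        simp only [List.length_cons]
        by_cases hf1 : fault < 1
        · rw [if_pos ⟨hv.1, hv.2, hf1⟩, if_neg (by omega : ¬ pvD report i < 0),
             ih (fault + 1) (by omega)]
          rw [if_neg (show ¬ fault + 1 < 1 by omega), if_pos hf1]
          congr 1
          simp only [decide_eq_decide]
          omega
        · rw [if_neg (fun h => hf1 h.2.2), if_pos ⟨hv.1, hv.2, by omega⟩,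
             if_neg (by omega : ¬ pvD report i < 0), if_neg hf1]
          simp
    · -- invalid difference: both sides are False
      have hA : (decide (|pvD report i| < 1 ∨ |pvD report i| > 3)) = true := by
        simp only [decide_eq_true_eq]
        omega
      rw [if_neg (fun h => hv ⟨h.1, h.2.1⟩), if_neg (fun h => hv ⟨h.1, h.2.1⟩), hA]
      simp

-- ===== VERDICT (by name: the statement is the Claim_ definition above) =====
theorem is_safe_decrease_spec : Claim_equal_is_safe_decrease := by
  intro report _
  simp only [Spec_is_safe_decrease, is_safe_decrease, is_safe_decrease_alt]
  rw [pvLoopA_eq report _ 0 le_rfl]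
  have hfun : (fun i => (PySem.List.pyGet? report (i + 1)).getD 0 - (PySem.List.pyGet? report i).getD 0)
      = pvD report := rfl
  rw [hfun]
  rw [if_pos (show (0:Int) < 1 by omega)]
  set M := (PySem.List.pyRange 0 ((report.length : Int) - 1) 1).map (pvD report) with hM
  have hall : (M.all fun d => !decide (|d| < 1 ∨ |d| > 3))
      = !(M.any fun d => decide (|d| < 1 ∨ |d| > 3)) := by
    rw [List.all_eq_not_any_not]
    simp
  rw [hall]
  cases (M.any fun d => decide (|d| < 1 ∨ |d| > 3)) <;> simp
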